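-- pv_equiv track=rewrite | github.com/qws941/fortinet | src/analysis/advanced_analytics.py | _calculate_severity
-- ===== SOURCE A (Python) =====
-- from typing import Dict, List, Optional
--
-- def _calculate_severity(anomalies: List[Dict]) -> str:
--     """전체 이상 징후 심각도 계산"""
--     if not anomalies:
--         return "normal"
--
--     severities = [a.get("severity", "low") for a in anomalies]
--
--     if "critical" in severities:
--         return "critical"
--     elif "high" in severities:
--         return "high"
--     elif "medium" in severities:
--         return "medium"
--     else:
--         return "low"
-- ===== SOURCE B (Python) =====
-- def _calculate_severity(anomalies):
--     """Same result via one pass computing the max severity rank."""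
--     if not anomalies:
--         return "normal"
--     rank = {"critical": 3, "high": 2, "medium": 1}
--     labels = ["low", "medium", "high", "critical"]
--     m = 0
--     for a in anomalies:
--         m = max(m, rank.get(a.get("severity", "low"), 0))
--     return labels[m]
-- ===== Notes on version B (the rewrite author's own statement) =====
-- stated objective: simpler
-- what changed: Replaced the list comprehension plus three sequential membership scans with a single pass that folds the maximum severity rank and maps it back to its label.
import Mathlib
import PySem

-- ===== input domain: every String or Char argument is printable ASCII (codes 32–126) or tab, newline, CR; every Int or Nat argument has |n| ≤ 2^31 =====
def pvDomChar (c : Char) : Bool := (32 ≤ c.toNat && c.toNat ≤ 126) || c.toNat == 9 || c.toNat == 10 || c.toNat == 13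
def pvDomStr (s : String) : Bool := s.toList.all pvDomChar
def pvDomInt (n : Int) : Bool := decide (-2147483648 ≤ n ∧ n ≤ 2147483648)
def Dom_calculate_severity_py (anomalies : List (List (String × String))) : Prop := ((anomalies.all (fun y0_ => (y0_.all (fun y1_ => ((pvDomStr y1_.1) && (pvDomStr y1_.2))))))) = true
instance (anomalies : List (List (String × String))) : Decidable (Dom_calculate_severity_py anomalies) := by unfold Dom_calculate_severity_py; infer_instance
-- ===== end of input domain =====

set_option maxHeartbeats 1000000


-- ===== PORT A =====
-- B changes only the algorithm (single max-rank pass instead of three membership scans); same return value.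
def calculate_severity_py (anomalies : List (List (String × String))) : String :=
  if anomalies = [] then "normal"
  else
    let severities := anomalies.map (fun a => PySem.Dict.getD (PySem.Dict.mk a) "severity" "low")
    if severities.contains "critical" then "critical"
    else if severities.contains "high" then "high"
    else if severities.contains "medium" then "medium"
    else "low"

-- ===== PORT B =====
-- rank.get(s, 0) from Source B
def pvRankOf (s : String) : Nat :=
  PySem.Dict.getD (PySem.Dict.mk [("critical", 3), ("high", 2), ("medium", 1)]) s 0

def calculate_severity_py_alt (anomalies : List (List (String × String))) : String :=
  if anomalies = [] then "normal"
  else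
    let m := anomalies.foldl (fun m a => max m (pvRankOf (PySem.Dict.getD (PySem.Dict.mk a) "severity" "low"))) 0
    (["low", "medium", "high", "critical"] : List String).getD m "low"

-- ===== PRECONDITION & SPEC =====
def Spec_calculate_severity_py (anomalies : List (List (String × String))) (out : String) : Prop := out = calculate_severity_py_alt anomalies
instance (anomalies : List (List (String × String))) (out : String) : Decidable (Spec_calculate_severity_py anomalies out) := by unfold Spec_calculate_severity_py; infer_instance

-- ===== CLAIM (what is proved, stated in full; the proofs are below) =====
def Claim_equal_calculate_severity_py : Prop := ∀ (anomalies : List (List (String × String))), Dom_calculate_severity_py anomalies → Spec_calculate_severity_py anomalies (calculate_severity_py anomalies)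

-- ===== LEMMAS AND PROOFS =====

theorem pvFoldMax_hoist (l : List String) (m : Nat) :
    l.foldl (fun m a => max m (pvRankOf a)) m = max m (l.foldl (fun m a => max m (pvRankOf a)) 0) := by
  induction l generalizing m with
  | nil => simp
  | cons a t ih =>
    simp only [List.foldl_cons]
    rw [ih, ih (max 0 (pvRankOf a))]
    omega

theorem pvRankOf_eq (s : String) :
    pvRankOf s = (if s = "critical" then 3 else if s = "high" then 2
                  else if s = "medium" then 1 else 0) := by
  by_cases hc : s = "critical"
  · subst hc; rfl
  · by_cases hh : s = "high"
    · subst hh; rfl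
    · by_cases hm : s = "medium"
      · subst hm; rfl
      · have h1 : ("critical" == s) = false := beq_eq_false_iff_ne.mpr (fun h => hc h.symm)
        have h2 : ("high" == s) = false := beq_eq_false_iff_ne.mpr (fun h => hh h.symm)
        have h3 : ("medium" == s) = false := beq_eq_false_iff_ne.mpr (fun h => hm h.symm)
        simp [pvRankOf, PySem.Dict.getD, PySem.Dict.get?, List.find?, h1, h2, h3, hc, hh, hm]

theorem pvFoldMax_eq (l : List String) :
    l.foldl (fun m a => max m (pvRankOf a)) 0 =
      (if l.contains "critical" then 3
       else if l.contains "high" then 2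
       else if l.contains "medium" then 1 else 0) := by
  induction l with
  | nil => simp
  | cons a t ih =>
    simp only [List.foldl_cons, List.contains_cons]
    rw [pvFoldMax_hoist, ih, pvRankOf_eq]
    simp only [beq_iff_eq, Bool.or_eq_true, List.contains_eq_mem, decide_eq_true_eq]
    by_cases hc : a = "critical"
    · subst hc
      by_cases m2 : "high" ∈ t <;> by_cases m3 : "medium" ∈ t <;> simp_all <;> split_ifs <;> omega
    · have hc2 : ¬("critical" = a) := fun h => hc h.symm
      by_cases hh : a = "high"
      · subst hh
        by_cases m1 : "critical" ∈ t <;> by_cases m3 : "medium" ∈ t <;> simp_all <;> split_ifs <;> omega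
      · have hh2 : ¬("high" = a) := fun h => hh h.symm
        by_cases hm : a = "medium"
        · subst hm
          by_cases m1 : "critical" ∈ t <;> by_cases m2 : "high" ∈ t <;> simp_all <;> split_ifs <;> omega
        · have hm2 : ¬("medium" = a) := fun h => hm h.symm
          by_cases m1 : "critical" ∈ t <;> by_cases m2 : "high" ∈ t <;>
            by_cases m3 : "medium" ∈ t <;> simp_all

theorem calculate_severity_py_eq (anomalies : List (List (String × String))) :
    calculate_severity_py anomalies = calculate_severity_py_alt anomalies := by
  unfold calculate_severity_py calculate_severity_py_alt
  by_cases h : anomalies = []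
  · simp [h]
  · simp only [h]
    rw [show (anomalies.foldl (fun m a => max m (pvRankOf (PySem.Dict.getD (PySem.Dict.mk a) "severity" "low"))) 0)
        = ((anomalies.map (fun a => PySem.Dict.getD (PySem.Dict.mk a) "severity" "low")).foldl
            (fun m a => max m (pvRankOf a)) 0) by rw [List.foldl_map]]
    rw [pvFoldMax_eq]
    split_ifs <;> rfl

-- ===== VERDICT (by name: the statement is the Claim_ definition above) =====
theorem calculate_severity_py_spec : Claim_equal_calculate_severity_py := by
  intro anomalies _
  unfold Spec_calculate_severity_py
  exact calculate_severity_py_eq anomalies
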